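-- pv_equiv track=rewrite | github.com/MohamedAliChaouachi/accent-fleet-analytics | src/accent_fleet/db/sql_loader.py | strip_sql_comments
-- ===== SOURCE A (Python) =====
-- def strip_sql_comments(sql: str) -> str:
--     """
--     Remove SQL comments before SQLAlchemy parses :named bind parameters.
--
--     SQLAlchemy's text() treats :tokens inside comments as bind params. That is
--     harmless until a statement has only comment mentions, at which point drivers
--     such as psycopg receive phantom parameters with no SQL type context.
--     """
--     out: list[str] = []
--     in_single = False
--     in_dollar = False
--     in_line_comment = False
--     in_block_comment = False
--     i = 0
--     while i < len(sql):
--         ch = sql[i]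
--         nxt = sql[i + 1] if i + 1 < len(sql) else ""
--
--         if in_line_comment:
--             if ch == "\n":
--                 in_line_comment = False
--                 out.append(ch)
--         elif in_block_comment:
--             if ch == "*" and nxt == "/":
--                 in_block_comment = False
--                 i += 1
--             elif ch == "\n":
--                 out.append(ch)
--         elif ch == "'" and not in_dollar:
--             in_single = not in_single
--             out.append(ch)
--         elif ch == "$" and nxt == "$" and not in_single:
--             in_dollar = not in_dollar
--             out.append("$$")
--             i += 1
--         elif ch == "-" and nxt == "-" and not in_single and not in_dollar:
--             in_line_comment = True
--             i += 1
--         elif ch == "/" and nxt == "*" and not in_single and not in_dollar: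
--             in_block_comment = True
--             i += 1
--         else:
--             out.append(ch)
--         i += 1
--     return "".join(out)
-- ===== SOURCE B (Python) =====
-- def strip_sql_comments(sql: str) -> str:
--     """Token-at-a-time scanner: consume whole quoted strings, dollar blocks and
--     comments in one step using str.find, instead of a per-character state machine."""
--     out = []
--     i, n = 0, len(sql)
--     while i < n:
--         ch = sql[i]
--         if ch == "'":
--             j = sql.find("'", i + 1)
--             end = n if j == -1 else j + 1
--             out.append(sql[i:end])
--             i = end
--         elif sql.startswith("$$", i):
--             j = sql.find("$$", i + 2)
--             end = n if j == -1 else j + 2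
--             out.append(sql[i:end])
--             i = end
--         elif sql.startswith("--", i):
--             j = sql.find("\n", i + 2)
--             i = n if j == -1 else j  # the newline itself is copied next round
--         elif sql.startswith("/*", i):
--             j = sql.find("*/", i + 2)
--             end = n if j == -1 else j
--             out.append("\n" * sql.count("\n", i + 2, end))
--             i = n if j == -1 else j + 2
--         else:
--             out.append(ch)
--             i += 1
--     return "".join(out)
-- ===== Notes on version B (the rewrite author's own statement) =====
-- stated objective: alternative
-- what changed: Replaced A's per-character loop over four boolean state flags by a token-at-a-time scanner that consumes a whole quoted string, dollar-quoted block, line comment or block comment in one step via str.find, copying string/dollar tokens verbatim and emitting only the newlines of comments.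
import Mathlib
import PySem

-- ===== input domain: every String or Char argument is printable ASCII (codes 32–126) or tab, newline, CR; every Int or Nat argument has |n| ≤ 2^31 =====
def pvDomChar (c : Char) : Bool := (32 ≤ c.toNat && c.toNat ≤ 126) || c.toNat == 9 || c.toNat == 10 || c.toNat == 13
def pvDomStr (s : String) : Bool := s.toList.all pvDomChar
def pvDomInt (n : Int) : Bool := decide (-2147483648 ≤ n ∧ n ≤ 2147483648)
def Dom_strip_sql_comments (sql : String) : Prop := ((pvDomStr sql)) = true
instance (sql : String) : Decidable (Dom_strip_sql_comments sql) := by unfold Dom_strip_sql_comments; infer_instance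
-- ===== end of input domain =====

-- B replaces A's per-character boolean state machine by a token-at-a-time scanner
-- (consume a whole quoted string / dollar block / comment in one step); objective: alternative.

-- ===== PORT A =====
-- Literal port of A's while loop: index i becomes the remaining list, nxt = rest.head?,
-- the four booleans are the same state; 'i += 1' inside a branch becomes rest.tail.
def stripACore : List Char → Bool → Bool → Bool → Bool → List Char
  | [], _, _, _, _ => []
  | ch :: rest, s, d, lc, bc =>
    if lc then
      if ch = '\n' then ch :: stripACore rest s d false bc
      else stripACore rest s d lc bc
    else if bc then
      if ch = '*' ∧ rest.head? = some '/' then stripACore rest.tail s d lc false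
      else if ch = '\n' then ch :: stripACore rest s d lc bc
      else stripACore rest s d lc bc
    else if ch = '\'' ∧ d = false then ch :: stripACore rest (!s) d lc bc
    else if ch = '$' ∧ rest.head? = some '$' ∧ s = false then
      '$' :: '$' :: stripACore rest.tail s (!d) lc bc
    else if ch = '-' ∧ rest.head? = some '-' ∧ s = false ∧ d = false then
      stripACore rest.tail s d true bc
    else if ch = '/' ∧ rest.head? = some '*' ∧ s = false ∧ d = false then
      stripACore rest.tail s d lc true
    else ch :: stripACore rest s d lc bc
termination_by l => l.length
decreasing_by all_goals simp [List.length_tail]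

def strip_sql_comments (sql : String) : String :=
  String.ofList (stripACore sql.toList false false false false)

-- ===== PORT B =====
-- scanQuote: sql.find("'", i+1) — consume through the closing quote (or to EOF).
def scanQuote : List Char → List Char × List Char
  | [] => ([], [])
  | x :: xs => if x = '\'' then ([x], xs) else
      let p := scanQuote xs; (x :: p.1, p.2)

-- scanDollar: sql.find("$$", i+2) — consume through the closing "$$" (or to EOF).
def scanDollar : List Char → List Char × List Char
  | [] => ([], [])
  | x :: xs =>
    if x = '$' ∧ xs.head? = some '$' then (['$', '$'], xs.tail)
    else let p := scanDollar xs; (x :: p.1, p.2)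

-- scanLine: sql.find("\n", i+2) — drop up to (not including) the newline.
def scanLine : List Char → List Char
  | [] => []
  | x :: xs => if x = '\n' then x :: xs else scanLine xs

-- scanBlock: sql.find("*/", i+2) + count of "\n" in between.
def scanBlock : List Char → List Char × List Char
  | [] => ([], [])
  | x :: xs =>
    if x = '*' ∧ xs.head? = some '/' then ([], xs.tail)
    else if x = '\n' then let p := scanBlock xs; ('\n' :: p.1, p.2)
    else scanBlock xs

theorem scanQuote_len (l : List Char) : (scanQuote l).2.length ≤ l.length := by
  induction l with
  | nil => simp [scanQuote]
  | cons x xs ih => simp only [scanQuote]; split <;> simp <;> omega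

theorem scanDollar_len (l : List Char) : (scanDollar l).2.length ≤ l.length := by
  induction l with
  | nil => simp [scanDollar]
  | cons x xs ih =>
    simp only [scanDollar]; split
    · simp [List.length_tail]; omega
    · simp; omega

theorem scanLine_len (l : List Char) : (scanLine l).length ≤ l.length := by
  induction l with
  | nil => simp [scanLine]
  | cons x xs ih => simp only [scanLine]; split <;> simp <;> omega

theorem scanBlock_len (l : List Char) : (scanBlock l).2.length ≤ l.length := by
  induction l with
  | nil => simp [scanBlock]
  | cons x xs ih =>
    simp only [scanBlock]; split
    · simp [List.length_tail]; omega
    · split <;> simp <;> omega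

-- Main scanner: Source B's while loop, one token per iteration.
def stripBCore : List Char → List Char
  | [] => []
  | ch :: xs =>
    if ch = '\'' then
      let p := scanQuote xs; ch :: p.1 ++ stripBCore p.2
    else if ch = '$' ∧ xs.head? = some '$' then
      let p := scanDollar xs.tail; '$' :: '$' :: p.1 ++ stripBCore p.2
    else if ch = '-' ∧ xs.head? = some '-' then
      stripBCore (scanLine xs.tail)
    else if ch = '/' ∧ xs.head? = some '*' then
      let p := scanBlock xs.tail; p.1 ++ stripBCore p.2
    else ch :: stripBCore xs
termination_by l => l.length
decreasing_by
  · have := scanQuote_len xs; simp_all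
  · have := scanDollar_len xs.tail; simp_all [List.length_tail]; omega
  · have := scanLine_len xs.tail; simp_all [List.length_tail]; omega
  · have := scanBlock_len xs.tail; simp_all [List.length_tail]; omega
  · simp

def strip_sql_comments_alt (sql : String) : String :=
  String.ofList (stripBCore sql.toList)

-- ===== PRECONDITION & SPEC =====
def Spec_strip_sql_comments (sql : String) (out : String) : Prop := out = strip_sql_comments_alt sql
instance (sql : String) (out : String) : Decidable (Spec_strip_sql_comments sql out) := by unfold Spec_strip_sql_comments; infer_instance

-- ===== CLAIM (what is proved, stated in full; the proofs are below) =====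
def Claim_equal_strip_sql_comments : Prop := ∀ (sql : String), Dom_strip_sql_comments sql → Spec_strip_sql_comments sql (strip_sql_comments sql)

-- ===== LEMMAS AND PROOFS =====

theorem A_single (l : List Char) :
    stripACore l true false false false =
      (scanQuote l).1 ++ stripACore (scanQuote l).2 false false false false := by
  induction l with
  | nil => simp [stripACore, scanQuote]
  | cons x xs ih =>
    by_cases hx : x = '\''
    · subst hx; simp [stripACore, scanQuote]
    · simp [stripACore, scanQuote, hx, ih]

theorem A_dollar (l : List Char) :
    stripACore l false true false false =
      (scanDollar l).1 ++ stripACore (scanDollar l).2 false false false false := by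
  induction l with
  | nil => simp [stripACore, scanDollar]
  | cons x xs ih =>
    by_cases hx : x = '$' ∧ xs.head? = some '$'
    · obtain ⟨h1, h2⟩ := hx
      subst h1
      simp [stripACore, scanDollar, h2]
    · simp [stripACore, scanDollar, hx, ih]

theorem A_line (l : List Char) :
    stripACore l false false true false = stripACore (scanLine l) false false false false := by
  induction l with
  | nil => simp [stripACore, scanLine]
  | cons x xs ih =>
    by_cases hx : x = '\n'
    · subst hx; simp [stripACore, scanLine]
    · simp [stripACore, scanLine, hx, ih]

theorem A_block (l : List Char) :
    stripACore l false false false true =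
      (scanBlock l).1 ++ stripACore (scanBlock l).2 false false false false := by
  induction l with
  | nil => simp [stripACore, scanBlock]
  | cons x xs ih =>
    by_cases hx : x = '*' ∧ xs.head? = some '/'
    · obtain ⟨h1, h2⟩ := hx
      subst h1
      simp [stripACore, scanBlock, h2]
    · by_cases hn : x = '\n'
      · subst hn; simp [stripACore, scanBlock, ih]
      · simp [stripACore, scanBlock, hx, hn, ih]

theorem core_eq (l : List Char) :
    stripACore l false false false false = stripBCore l := by
  induction l using stripBCore.induct with
  | case1 => simp [stripACore, stripBCore]
  | case2 xs p ih =>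
    simp [stripACore, stripBCore, A_single]
    exact ih
  | case3 x xs hq h p ih =>
    obtain ⟨h1, h2⟩ := h
    subst h1
    simp [stripACore, stripBCore, h2, A_dollar]
    exact ih
  | case4 x xs hq hd h ih =>
    obtain ⟨h1, h2⟩ := h
    subst h1
    simp [stripACore, stripBCore, h2, A_line, ih]
  | case5 x xs hq hd hl h p ih =>
    obtain ⟨h1, h2⟩ := h
    subst h1
    simp [stripACore, stripBCore, h2, A_block]
    exact ih
  | case6 x xs hq hd hl hb ih =>
    simp [stripACore, stripBCore, hq, hd, hl, hb, ih]

-- ===== VERDICT (by name: the statement is the Claim_ definition above) =====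
theorem strip_sql_comments_spec : Claim_equal_strip_sql_comments := by
  intro sql _
  unfold Spec_strip_sql_comments strip_sql_comments strip_sql_comments_alt
  rw [core_eq]
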